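-- pv_equiv track=rewrite | github.com/miliar/Code_Jam_Webscraper | solutions_python/Problem_181/2096.py | solve
-- ===== SOURCE A (Python) =====
-- def solve(case):
--     poss = [case[0]]
--     for l in case[1::]:
--         poss0 = [l0+l for l0 in poss]
--         poss1 = [l+l0 for l0 in poss]
--         poss = poss0
--         poss.extend(poss1)
--     poss = sorted(poss)
--     return poss[-1]
-- ===== SOURCE B (Python) =====
-- def solve(case):
--     best = None
--     for mask in range(2 ** (len(case) - 1)):
--         s = case[0]
--         m = mask
--         for i in range(1, len(case)):
--             if m % 2 == 1:
--                 s = case[i] + s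
--             else:
--                 s = s + case[i]
--             m //= 2
--         if best is None or s > best:
--             best = s
--     return best
-- ===== Notes on version B (the rewrite author's own statement) =====
-- stated objective: alternative
-- what changed: Replaces the list-doubling accumulation plus final sort-and-take-last with a direct bitmask enumeration: each of the 2^(n-1) prepend/append choice vectors is read off the bits of a counter, the candidate string is built in one inner loop, and a running lexicographic maximum replaces sorting the full candidate list.
import Mathlib
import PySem

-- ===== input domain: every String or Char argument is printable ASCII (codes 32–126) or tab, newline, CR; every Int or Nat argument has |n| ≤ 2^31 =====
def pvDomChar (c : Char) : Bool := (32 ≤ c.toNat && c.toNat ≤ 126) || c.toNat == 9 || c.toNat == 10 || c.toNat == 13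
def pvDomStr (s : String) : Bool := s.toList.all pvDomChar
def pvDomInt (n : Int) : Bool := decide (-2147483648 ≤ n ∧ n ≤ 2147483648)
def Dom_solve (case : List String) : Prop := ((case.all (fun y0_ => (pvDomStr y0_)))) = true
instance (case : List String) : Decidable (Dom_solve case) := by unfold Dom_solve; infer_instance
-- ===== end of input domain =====

-- B replaces A's list-doubling + sort-and-take-last with a bitmask enumeration and a running maximum (alternative decomposition, same candidate set).

-- ===== PORT A =====
def solve (case : List String) : String :=
  let poss := [PySem.List.pyGetD case 0 ""]          -- case[0]; Pre_ excludes the empty list (IndexError)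
  let poss := (PySem.List.slice case (some 1) none).foldl
      (fun poss l => poss.map (fun l0 => l0 ++ l) ++ poss.map (fun l0 => l ++ l0)) poss
  let poss := PySem.List.sorted poss (fun x => x) false
  PySem.List.pyGetD poss (-1) ""                     -- poss[-1]; poss is nonempty whenever case is

-- ===== PORT B =====
def solve_alt (case : List String) : String :=
  let n : Int := case.length
  let best : Option String :=
    (PySem.List.pyRange 0 ((2 : Int) ^ (n - 1).toNat) 1).foldl   -- range(2 ** (len(case)-1)); exponent n-1 ≥ 0 whenever case ≠ []
      (fun best mask =>
        let sm :=
          (PySem.List.pyRange 1 n 1).foldl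
            (fun sm i =>
              ((if PySem.Int.mod sm.2 2 = 1
                then PySem.List.pyGetD case i "" ++ sm.1
                else sm.1 ++ PySem.List.pyGetD case i ""),
               PySem.Int.floordiv sm.2 2))
            (PySem.List.pyGetD case 0 "", mask)
        match best with
        | none => some sm.1
        | some b => if b < sm.1 then some sm.1 else some b)
      none
  best.getD ""                                       -- best is not None whenever case ≠ []

-- ===== PRECONDITION & SPEC =====
-- Pre_ excludes only the empty list, on which Python A raises IndexError (case[0]) and Python B raises TypeError (range(2**-1)).
def Pre_solve (case : List String) : Prop := case ≠ []
instance (case : List String) : Decidable (Pre_solve case) := by unfold Pre_solve; infer_instance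
def pvWitness_solve : List String := ["ba", "c", "a"]
def Spec_solve (case : List String) (out : String) : Prop := out = solve_alt case
instance (case : List String) (out : String) : Decidable (Spec_solve case out) := by unfold Spec_solve; infer_instance

-- ===== CLAIM (what is proved, stated in full; the proofs are below) =====
def Claim_equal_solve : Prop := ∀ (case : List String), Dom_solve case → Pre_solve case → Spec_solve case (solve case)

-- ===== LEMMAS AND PROOFS =====

-- bld t s m : B's inner loop on the Nat side — consume the bits of m low-to-high, prepending on 1, appending on 0.
def bld (t : List String) (s : String) (m : Nat) : String :=
  match t with
  | [] => s
  | l :: t' => bld t' (if m % 2 = 1 then l ++ s else s ++ l) (m / 2)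

-- running lexicographic maximum (B's `if best is None or s > best`)
def runmax (b : String) (t : List String) : String :=
  t.foldl (fun b s => if b < s then s else b) b

theorem bld_int (t : List String) (s : String) (m : Nat) :
    (t.foldl
      (fun (sm : String × Int) (l : String) =>
        ((if PySem.Int.mod sm.2 2 = 1 then l ++ sm.1 else sm.1 ++ l),
         PySem.Int.floordiv sm.2 2))
      (s, (m : Int))).1 = bld t s m := by
  induction t generalizing s m with
  | nil => rfl
  | cons l t ih =>
    have hmod : PySem.Int.mod (m : Int) 2 = ((m % 2 : Nat) : Int) := by
      exact_mod_cast PySem.Int.mod_natCast m 2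
    have hdiv : PySem.Int.floordiv (m : Int) 2 = ((m / 2 : Nat) : Int) := by
      exact_mod_cast PySem.Int.floordiv_natCast m 2
    have hcond : (((m % 2 : Nat) : Int) = 1) ↔ (m % 2 = 1) := by omega
    simp only [List.foldl_cons]
    rw [hmod, hdiv]
    by_cases h : m % 2 = 1
    · rw [if_pos (hcond.mpr h), ih]; simp [bld, h]
    · rw [if_neg (fun hc => h (hcond.mp hc)), ih]; simp [bld, h]

-- bld only reads the low (t.length) bits of the mask
theorem bld_add_pow (t : List String) (s : String) (m : Nat) :
    bld t s (2 ^ t.length + m) = bld t s m := by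
  induction t generalizing s m with
  | nil => rfl
  | cons l t ih =>
    have h1 : (2 ^ (t.length + 1) + m) % 2 = m % 2 := by
      rw [pow_succ]; omega
    have h2 : (2 ^ (t.length + 1) + m) / 2 = 2 ^ t.length + m / 2 := by
      rw [pow_succ]; omega
    simp only [List.length_cons, bld, h1, h2, ih]

-- appending one element: its choice is the top bit
theorem bld_append (t : List String) (l : String) (s : String) (m : Nat) :
    bld (t ++ [l]) s m =
      if m / 2 ^ t.length % 2 = 1 then l ++ bld t s m else bld t s m ++ l := by
  induction t generalizing s m with
  | nil => simp [bld]
  | cons a t ih =>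
    have h : m / 2 ^ (t.length + 1) = m / 2 / 2 ^ t.length := by
      rw [Nat.div_div_eq_div_mul, pow_succ, Nat.mul_comm]
    simp only [List.cons_append, List.length_cons, bld]
    rw [ih, h]

-- A's accumulated candidate list IS the bitmask enumeration, in the same order
theorem possA_eq_map (t : List String) (c0 : String) :
    t.foldl (fun poss l => poss.map (fun l0 => l0 ++ l) ++ poss.map (fun l0 => l ++ l0)) [c0]
      = (List.range (2 ^ t.length)).map (fun m => bld t c0 m) := by
  induction t using List.reverseRecOn with
  | nil => rfl
  | append_singleton t l ih =>
    rw [List.foldl_append, ih]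
    simp only [List.foldl_cons, List.foldl_nil, List.map_map]
    have hrange : List.range (2 ^ (t ++ [l]).length)
        = List.range (2 ^ t.length) ++ (List.range (2 ^ t.length)).map (fun m => 2 ^ t.length + m) := by
      rw [← List.range_add]
      congr 1
      simp [pow_succ]; ring
    rw [hrange, List.map_append, List.map_map]
    congr 1
    · apply List.map_congr_left
      intro m hm
      rw [List.mem_range] at hm
      have hd : m / 2 ^ t.length = 0 := Nat.div_eq_of_lt hm
      rw [bld_append, hd]
      norm_num
    · apply List.map_congr_left
      intro m hm
      rw [List.mem_range] at hm
      have hp : 0 < 2 ^ t.length := by positivity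
      have hd : (2 ^ t.length + m) / 2 ^ t.length % 2 = 1 := by
        rw [Nat.add_div_left _ hp, Nat.div_eq_of_lt hm]
      simp only [Function.comp_apply]
      rw [bld_append, if_pos hd, bld_add_pow]

-- the Option running max over a cons is `some` of runmax
theorem optmax_cons (x : String) (t : List String) :
    (x :: t).foldl
      (fun (best : Option String) (s : String) =>
        match best with
        | none => some s
        | some b => if b < s then some s else some b) none
      = some (runmax x t) := by
  suffices h : ∀ (t : List String) (b : String),
      t.foldl (fun (best : Option String) (s : String) =>
        match best with
        | none => some s
        | some b => if b < s then some s else some b) (some b) = some (runmax b t) by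
    simpa using h t x
  intro t
  induction t with
  | nil => intro b; rfl
  | cons s t ih =>
    intro b
    simp only [List.foldl_cons]
    by_cases h : b < s
    · rw [if_pos h, ih]
      congr 1
      simp only [runmax, List.foldl_cons]
      rw [if_pos h]
    · rw [if_neg h, ih]
      congr 1
      simp only [runmax, List.foldl_cons]
      rw [if_neg h]

theorem runmax_mem (b : String) (t : List String) : runmax b t = b ∨ runmax b t ∈ t := by
  induction t generalizing b with
  | nil => left; rfl
  | cons s t ih =>
    simp only [runmax, List.foldl_cons]
    by_cases h : b < s
    · simp only [if_pos h]
      rcases ih s with h' | h'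
      · right; simp [runmax] at h'; simp [h']
      · right; simp [runmax] at h'; simp [h']
    · simp only [if_neg h]
      rcases ih b with h' | h'
      · left; simpa [runmax] using h'
      · right; simp [runmax] at h'; simp [h']

theorem le_runmax (b : String) (t : List String) :
    b ≤ runmax b t ∧ ∀ y ∈ t, y ≤ runmax b t := by
  induction t generalizing b with
  | nil => exact ⟨le_refl _, by simp⟩
  | cons s t ih =>
    simp only [runmax, List.foldl_cons]
    by_cases h : b < s
    · simp only [if_pos h]
      refine ⟨le_of_lt (lt_of_lt_of_le h (ih s).1), ?_⟩
      intro y hy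
      rcases List.mem_cons.mp hy with rfl | hy
      · exact (ih y).1
      · exact (ih s).2 y hy
    · simp only [if_neg h]
      refine ⟨(ih b).1, ?_⟩
      intro y hy
      rcases List.mem_cons.mp hy with rfl | hy
      · exact le_trans (le_of_not_gt h) (ih b).1
      · exact (ih b).2 y hy

-- last element of Python-sorted list = running max
theorem sorted_last_eq_runmax (x : String) (t : List String) :
    PySem.List.pyGetD (PySem.List.sorted (x :: t) (fun y => y) false) (-1) "" = runmax x t := by
  set L := PySem.List.sorted (x :: t) (fun y => y) false with hL
  have hperm : L.Perm (x :: t) := PySem.List.sorted_perm _ _ _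
  have hne : L ≠ [] := by
    intro h
    have := hperm.length_eq
    simp [h] at this
  rw [PySem.List.pyGetD_neg_one _ _ hne]
  have hlastmem : L.getLast hne ∈ x :: t := hperm.mem_iff.mp (List.getLast_mem hne)
  have hrmem : runmax x t ∈ L := by
    rcases runmax_mem x t with h | h
    · exact hperm.mem_iff.mpr (by simp [h])
    · exact hperm.mem_iff.mpr (by simp [h])
  -- every element of L is ≤ its last element
  have hub : ∀ z ∈ L, z ≤ L.getLast hne := by
    intro z hz
    obtain ⟨i, hi, rfl⟩ := List.mem_iff_getElem.mp hz
    rw [List.getLast_eq_getElem]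
    have := PySem.List.sorted_id_getElem_mono (xs := x :: t)
      (p := i) (q := L.length - 1) (by omega) (by rw [← hL]; omega)
    simpa [← hL] using this
  have h1 : L.getLast hne ≤ runmax x t := by
    rcases List.mem_cons.mp hlastmem with h | h
    · rw [h]; exact (le_runmax x t).1
    · exact (le_runmax x t).2 _ h
  have h2 : runmax x t ≤ L.getLast hne := hub _ hrmem
  exact le_antisymm h1 h2

-- ===== VERDICT (by name: the statement is the Claim_ definition above) =====
theorem solve_spec : Claim_equal_solve := by
  intro case _ hpre
  unfold Spec_solve
  obtain ⟨c0, rest, rfl⟩ : ∃ c0 rest, case = c0 :: rest := by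
    cases case with
    | nil => exact absurd rfl hpre
    | cons a b => exact ⟨a, b, rfl⟩
  -- the common candidate list
  set cand : List String := (List.range (2 ^ rest.length)).map (fun m => bld rest c0 m) with hcand
  obtain ⟨x, t, hxt⟩ : ∃ x t, cand = x :: t := by
    have : cand ≠ [] := by
      rw [hcand]
      simp only [ne_eq, List.map_eq_nil_iff, List.range_eq_nil]
      exact pow_ne_zero _ (by norm_num)
    exact List.exists_cons_of_ne_nil this
  -- A's value
  have hA : solve (c0 :: rest)
      = PySem.List.pyGetD (PySem.List.sorted cand (fun y => y) false) (-1) "" := by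
    simp only [solve]
    rw [PySem.List.pyGetD_zero_cons, PySem.List.slice_from (c0 :: rest) (by norm_num : (0:Int) ≤ 1)]
    have hdrop : List.drop (1:Int).toNat (c0 :: rest) = rest := by simp
    rw [hdrop, possA_eq_map, hcand]
  -- B's inner loop at mask ↑m computes bld rest c0 m
  have hinner : ∀ m : Nat,
      ((PySem.List.pyRange 1 ((c0 :: rest).length : Int) 1).foldl
        (fun (sm : String × Int) (i : Int) =>
          ((if PySem.Int.mod sm.2 2 = 1
            then PySem.List.pyGetD (c0 :: rest) i "" ++ sm.1
            else sm.1 ++ PySem.List.pyGetD (c0 :: rest) i ""),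
           PySem.Int.floordiv sm.2 2))
        (PySem.List.pyGetD (c0 :: rest) 0 "", (m : Int))).1 = bld rest c0 m := by
    intro m
    have h := PySem.List.foldl_pyRange_pyGetD (a := 1) (c0 :: rest) ""
      (fun (sm : String × Int) (l : String) =>
        ((if PySem.Int.mod sm.2 2 = 1 then l ++ sm.1 else sm.1 ++ l),
         PySem.Int.floordiv sm.2 2))
      (PySem.List.pyGetD (c0 :: rest) 0 "", (m : Int)) (by norm_num)
    rw [PySem.List.len_eq] at h
    have h' := congrArg Prod.fst h
    simp only [Int.toNat_one, List.drop_succ_cons, List.drop_zero,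
      PySem.List.pyGetD_zero_cons] at h'
    rw [bld_int] at h'
    rw [PySem.List.pyGetD_zero_cons]
    exact h'
  -- B's value
  have hB : solve_alt (c0 :: rest) = (cand.foldl
      (fun (best : Option String) (s : String) =>
        match best with
        | none => some s
        | some b => if b < s then some s else some b) none).getD "" := by
    simp only [solve_alt]
    have hk : ((((c0 :: rest).length : Int)) - 1).toNat = rest.length := by simp
    have hpow : (2 : Int) ^ rest.length = ((2 ^ rest.length : Nat) : Int) := by push_cast; ring
    rw [hk, hpow, PySem.List.pyRange_zero_nat, List.foldl_map, hcand, List.foldl_map]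
    simp only [hinner]
  rw [hA, hB, hxt, optmax_cons, sorted_last_eq_runmax]
  rfl
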